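-- pv_equiv track=rewrite | github.com/simonfqy/SimonfqyGitHub | lintcode/medium/793_intersection_of_arrays.py | intersectionOfArrays
-- ===== SOURCE A (Python) =====
-- def intersectionOfArrays(arrs):
--     set_1, set_2 = set(), set()
--     for i, arr in enumerate(arrs):
--         for element in arr:
--             if i > 0 and element not in set_1:
--                 continue
--             set_2.add(element)
--         set_1, set_2 = set_2, set_1
--         set_2.clear()
--     return len(set_1)
-- ===== SOURCE B (Python) =====
-- def intersectionOfArrays(arrs):
--     counts = {}
--     for arr in arrs:
--         for x in set(arr):
--             counts[x] = counts.get(x, 0) + 1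
--     n = len(arrs)
--     return sum(1 for c in counts.values() if c == n)
-- ===== Notes on version B (the rewrite author's own statement) =====
-- stated objective: alternative
-- what changed: Replaces the running two-set intersection (rebuild-and-clear of an intersection set per array) by a single counting pass: a dict counts in how many arrays each element occurs (deduplicated per array via set(arr)), then the elements counted len(arrs) times are tallied; same asymptotic cost, different algorithm and data structure.
import Mathlib
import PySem

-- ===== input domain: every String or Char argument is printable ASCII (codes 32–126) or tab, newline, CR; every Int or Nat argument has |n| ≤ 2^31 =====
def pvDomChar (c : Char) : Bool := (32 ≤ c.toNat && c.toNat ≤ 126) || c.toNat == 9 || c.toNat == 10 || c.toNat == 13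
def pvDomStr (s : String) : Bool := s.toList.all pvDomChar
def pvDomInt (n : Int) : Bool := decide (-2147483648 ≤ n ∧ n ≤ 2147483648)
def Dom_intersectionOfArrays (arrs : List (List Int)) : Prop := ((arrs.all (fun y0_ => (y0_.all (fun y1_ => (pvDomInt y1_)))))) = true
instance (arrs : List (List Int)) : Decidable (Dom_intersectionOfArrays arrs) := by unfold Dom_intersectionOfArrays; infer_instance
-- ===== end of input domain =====

-- B replaces A's repeated running-intersection set rebuilds by one per-array-deduplicated
-- counting pass plus a filter of the counts equal to len(arrs) (objective: alternative algorithm, same cost).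

-- ===== PORT A =====
-- literal port of A: two sets, running intersection with swap-and-clear per array
def intersectionOfArrays (arrs : List (List Int)) : Int :=
  let st := (PySem.List.enumerate arrs 0).foldl
    (fun (s : PySem.Set Int × PySem.Set Int) (p : Int × List Int) =>
      let s2 := p.2.foldl
        (fun (t : PySem.Set Int) e =>
          if p.1 > 0 ∧ ¬ (PySem.Set.contains s.1 e = true) then t else PySem.Set.add t e)
        s.2
      -- set_1, set_2 = set_2, set_1 ; set_2.clear()
      (s2, ([] : PySem.Set Int)))
    (([] : PySem.Set Int), ([] : PySem.Set Int))
  (st.1.length : Int)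

-- ===== PORT B =====
-- literal port of Source B: dict counting per-array-distinct occurrences, then tally counts == len(arrs)
def intersectionOfArrays_alt (arrs : List (List Int)) : Int :=
  let counts := arrs.foldl
    (fun (d : PySem.Dict Int Int) arr =>
      (PySem.Set.ofList arr).foldl (fun d x => d.insert x (d.getD x 0 + 1)) d)
    PySem.Dict.empty
  let n : Int := arrs.length
  ((counts.values.countP (fun c => c == n) : Nat) : Int)

-- ===== PRECONDITION & SPEC =====
def Spec_intersectionOfArrays (arrs : List (List Int)) (out : Int) : Prop := out = intersectionOfArrays_alt arrs
instance (arrs : List (List Int)) (out : Int) : Decidable (Spec_intersectionOfArrays arrs out) := by unfold Spec_intersectionOfArrays; infer_instance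

-- ===== CLAIM (what is proved, stated in full; the proofs are below) =====
def Claim_equal_intersectionOfArrays : Prop := ∀ (arrs : List (List Int)), Dom_intersectionOfArrays arrs → Spec_intersectionOfArrays arrs (intersectionOfArrays arrs)

-- ===== LEMMAS AND PROOFS =====

-- membership in A's inner per-array loop (skip when P holds, else add)
theorem mem_foldl_addIf (P : Int → Prop) [DecidablePred P] (arr : List Int) (t0 : PySem.Set Int) (y : Int) :
    y ∈ arr.foldl (fun (t : PySem.Set Int) e => if P e then t else PySem.Set.add t e) t0 ↔
      y ∈ t0 ∨ (y ∈ arr ∧ ¬ P y) := by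
  induction arr generalizing t0 with
  | nil => simp
  | cons a l ih =>
    simp only [List.foldl_cons, ih, List.mem_cons]
    by_cases h : P a
    · simp only [h, if_true]
      constructor
      · rintro (h1 | ⟨h1, h2⟩)
        · exact Or.inl h1
        · exact Or.inr ⟨Or.inr h1, h2⟩
      · rintro (h1 | ⟨(rfl | h1), h2⟩)
        · exact Or.inl h1
        · exact absurd h h2
        · exact Or.inr ⟨h1, h2⟩
    · simp [h, PySem.Set.mem_add]; constructor
      · rintro ((h1 | h1) | h2)
        · exact Or.inl h1
        · exact Or.inr ⟨Or.inl h1, h1 ▸ h⟩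
        · exact Or.inr ⟨Or.inr h2.1, h2.2⟩
      · rintro (h1 | ⟨(h1 | h1), h2⟩)
        · exact Or.inl (Or.inl h1)
        · exact Or.inl (Or.inr h1)
        · exact Or.inr ⟨h1, h2⟩

theorem nodup_foldl_addIf (P : Int → Prop) [DecidablePred P] (arr : List Int) (t0 : PySem.Set Int)
    (h : t0.Nodup) :
    (arr.foldl (fun (t : PySem.Set Int) e => if P e then t else PySem.Set.add t e) t0).Nodup := by
  induction arr generalizing t0 with
  | nil => exact h
  | cons a l ih =>
    simp only [List.foldl_cons]
    split
    · exact ih _ h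
    · exact ih _ (PySem.Set.nodup_add _ _ h)

-- the step function of A's outer loop
def aStep (s : PySem.Set Int × PySem.Set Int) (p : Int × List Int) : PySem.Set Int × PySem.Set Int :=
  (p.2.foldl
      (fun (t : PySem.Set Int) e =>
        if p.1 > 0 ∧ ¬ (PySem.Set.contains s.1 e = true) then t else PySem.Set.add t e)
      s.2,
   ([] : PySem.Set Int))

-- A's outer loop over the tail (all indices positive) computes the running intersection
theorem aLoop_spec (l : List (List Int)) (s : Int) (hs : 0 < s) (S : PySem.Set Int) (hS : S.Nodup) :
    ((PySem.List.enumerate l s).foldl aStep (S, ([] : PySem.Set Int))).1.Nodup ∧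
      (∀ y, y ∈ ((PySem.List.enumerate l s).foldl aStep (S, ([] : PySem.Set Int))).1 ↔
        y ∈ S ∧ ∀ arr ∈ l, y ∈ arr) := by
  induction l generalizing s S with
  | nil =>
    rw [PySem.List.enumerate_nil, List.foldl_nil]
    exact ⟨hS, fun y => by simp⟩
  | cons a l ih =>
    rw [PySem.List.enumerate_cons, List.foldl_cons]
    have hstep : aStep (S, ([] : PySem.Set Int)) (s, a) =
        (a.foldl (fun (t : PySem.Set Int) e =>
            if (0 : Int) < s ∧ ¬ (PySem.Set.contains S e = true) then t else PySem.Set.add t e)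
          ([] : PySem.Set Int), ([] : PySem.Set Int)) := rfl
    rw [hstep]
    have hnd : (a.foldl (fun (t : PySem.Set Int) e =>
        if (0 : Int) < s ∧ ¬ (PySem.Set.contains S e = true) then t else PySem.Set.add t e) []).Nodup :=
      nodup_foldl_addIf _ a [] List.nodup_nil
    have hmem : ∀ y, y ∈ a.foldl (fun (t : PySem.Set Int) e =>
        if (0 : Int) < s ∧ ¬ (PySem.Set.contains S e = true) then t else PySem.Set.add t e) [] ↔
        y ∈ ([] : PySem.Set Int) ∨ (y ∈ a ∧ ¬ ((0 : Int) < s ∧ ¬ (PySem.Set.contains S y = true))) :=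
      fun y => mem_foldl_addIf _ a [] y
    obtain ⟨ih1, ih2⟩ := ih (s + 1) (by omega) _ hnd
    refine ⟨ih1, fun y => ?_⟩
    rw [ih2 y, hmem y]
    simp only [List.not_mem_nil, false_or, PySem.Set.contains_iff, not_and, not_not, List.mem_cons]
    constructor
    · rintro ⟨⟨hya, hP⟩, hall⟩
      exact ⟨hP hs, fun arr h => h.elim (fun h => h ▸ hya) (hall arr)⟩
    · rintro ⟨hyS, hall⟩
      exact ⟨⟨hall a (Or.inl rfl), fun _ => hyS⟩, fun arr h => hall arr (Or.inr h)⟩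

-- characterisation of A's final set on a nonempty input
theorem a_final (a : List Int) (l : List (List Int)) :
    ((PySem.List.enumerate (a :: l) 0).foldl aStep (([] : PySem.Set Int), ([] : PySem.Set Int))).1.Nodup ∧
      (∀ y, y ∈ ((PySem.List.enumerate (a :: l) 0).foldl aStep (([] : PySem.Set Int), ([] : PySem.Set Int))).1 ↔
        ∀ arr ∈ a :: l, y ∈ arr) := by
  rw [PySem.List.enumerate_cons, List.foldl_cons]
  have hstep : aStep (([] : PySem.Set Int), ([] : PySem.Set Int)) (0, a) =
      (a.foldl (fun (t : PySem.Set Int) e =>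
          if (0 : Int) < 0 ∧ ¬ (PySem.Set.contains ([] : PySem.Set Int) e = true) then t else PySem.Set.add t e)
        ([] : PySem.Set Int), ([] : PySem.Set Int)) := rfl
  rw [hstep]
  have hnd : (a.foldl (fun (t : PySem.Set Int) e =>
      if (0 : Int) < 0 ∧ ¬ (PySem.Set.contains ([] : PySem.Set Int) e = true) then t else PySem.Set.add t e) []).Nodup :=
    nodup_foldl_addIf _ a [] List.nodup_nil
  have hmem : ∀ y, y ∈ a.foldl (fun (t : PySem.Set Int) e =>
      if (0 : Int) < 0 ∧ ¬ (PySem.Set.contains ([] : PySem.Set Int) e = true) then t else PySem.Set.add t e) [] ↔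
      y ∈ ([] : PySem.Set Int) ∨ (y ∈ a ∧ ¬ ((0 : Int) < 0 ∧ ¬ (PySem.Set.contains ([] : PySem.Set Int) y = true))) :=
    fun y => mem_foldl_addIf _ a [] y
  simp only [zero_add]
  obtain ⟨ih1, ih2⟩ := aLoop_spec l 1 (by omega) _ hnd
  refine ⟨ih1, fun y => ?_⟩
  rw [ih2 y, hmem y]
  simp only [List.not_mem_nil, false_or, List.mem_cons]
  constructor
  · rintro ⟨⟨hya, _⟩, hall⟩
    exact fun arr h => h.elim (fun h => h ▸ hya) (hall arr)
  · intro hall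
    exact ⟨⟨hall a (Or.inl rfl), by omega⟩, fun arr h => hall arr (Or.inr h)⟩

-- B's counter after the double loop
def bCounts (arrs : List (List Int)) : PySem.Dict Int Int :=
  arrs.foldl
    (fun (d : PySem.Dict Int Int) arr =>
      (PySem.Set.ofList arr).foldl (fun d x => d.insert x (d.getD x 0 + 1)) d)
    PySem.Dict.empty

theorem bCounts_getD (arrs : List (List Int)) (d : PySem.Dict Int Int) (v : Int) :
    (arrs.foldl
        (fun (d : PySem.Dict Int Int) arr =>
          (PySem.Set.ofList arr).foldl (fun d x => d.insert x (d.getD x 0 + 1)) d)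
        d).getD v 0 =
      d.getD v 0 + (arrs.countP (fun arr => decide (v ∈ arr)) : Int) := by
  induction arrs generalizing d with
  | nil => simp
  | cons a l ih =>
    rw [List.foldl_cons, ih, PySem.Dict.getD_foldl_insert_add_one, List.countP_cons]
    by_cases h : v ∈ a
    · have : List.count v (PySem.Set.ofList a) = 1 :=
        List.count_eq_one_of_mem (PySem.Set.nodup_ofList a) ((PySem.Set.mem_ofList a v).2 h)
      simp [this, h]; ring
    · have hz : List.count v (PySem.Set.ofList a) = 0 :=
        List.count_eq_zero.2 (fun hm => h ((PySem.Set.mem_ofList a v).1 hm))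
      simp [hz, h]

theorem bCounts_keys_nodup (arrs : List (List Int)) (d : PySem.Dict Int Int) (h : d.keys.Nodup) :
    (arrs.foldl
        (fun (d : PySem.Dict Int Int) arr =>
          (PySem.Set.ofList arr).foldl (fun d x => d.insert x (d.getD x 0 + 1)) d)
        d).keys.Nodup := by
  induction arrs generalizing d with
  | nil => exact h
  | cons a l ih =>
    exact ih _ (PySem.Dict.nodup_keys_foldl_insert _ _ _ h)

theorem bCounts_mem_keys (arrs : List (List Int)) (d : PySem.Dict Int Int) (y : Int) :
    y ∈ (arrs.foldl
        (fun (d : PySem.Dict Int Int) arr =>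
          (PySem.Set.ofList arr).foldl (fun d x => d.insert x (d.getD x 0 + 1)) d)
        d).keys ↔ y ∈ d.keys ∨ ∃ arr ∈ arrs, y ∈ arr := by
  induction arrs generalizing d with
  | nil => simp
  | cons a l ih =>
    rw [List.foldl_cons, ih]
    rw [PySem.Dict.keys_foldl_insert]
    simp only [PySem.Set.mem_update, PySem.Set.mem_ofList, List.mem_cons]
    constructor
    · rintro ((h | h) | ⟨arr, hm, hy⟩)
      · exact Or.inl h
      · exact Or.inr ⟨a, Or.inl rfl, h⟩
      · exact Or.inr ⟨arr, Or.inr hm, hy⟩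
    · rintro (h | ⟨arr, (rfl | hm), hy⟩)
      · exact Or.inl (Or.inl h)
      · exact Or.inl (Or.inr hy)
      · exact Or.inr ⟨arr, hm, hy⟩

-- ===== VERDICT (by name: the statement is the Claim_ definition above) =====
theorem intersectionOfArrays_spec : Claim_equal_intersectionOfArrays := by
  intro arrs _
  unfold Spec_intersectionOfArrays intersectionOfArrays intersectionOfArrays_alt
  simp only []
  -- rewrite B's value through the keys of the counter
  have hknd := bCounts_keys_nodup arrs PySem.Dict.empty (by simp)
  set C := arrs.foldl
      (fun (d : PySem.Dict Int Int) arr =>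
        (PySem.Set.ofList arr).foldl (fun d x => d.insert x (d.getD x 0 + 1)) d)
      PySem.Dict.empty with hC
  have hvals : C.values = C.keys.map (fun k => C.getD k 0) :=
    PySem.Dict.values_eq_map_keys C hknd 0
  have hcount : ∀ v, C.getD v 0 = (arrs.countP (fun arr => decide (v ∈ arr)) : Int) := by
    intro v; rw [hC, bCounts_getD]; simp
  have hBnat : C.values.countP (fun c => c == (arrs.length : Int)) =
      (C.keys.filter (fun k => C.getD k 0 == (arrs.length : Int))).length := by
    rw [hvals, List.countP_map, List.countP_eq_length_filter]; rfl
  -- the filtered keys and A's final set are permutations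
  cases arrs with
  | nil => rfl
  | cons a l =>
    have ⟨hAnd, hAmem⟩ := a_final a l
    set SA := ((PySem.List.enumerate (a :: l) 0).foldl aStep (([] : PySem.Set Int), ([] : PySem.Set Int))).1 with hSA
    set KF := C.keys.filter (fun k => C.getD k 0 == ((a :: l).length : Int)) with hKF
    have hmemKF : ∀ y, y ∈ KF ↔ ∀ arr ∈ a :: l, y ∈ arr := by
      intro y
      rw [hKF, List.mem_filter]
      constructor
      · rintro ⟨hk, hc⟩
        have := hcount y
        have hc' : C.getD y 0 = ((a :: l).length : Int) := by
          simpa using hc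
        rw [this] at hc'
        have : (a :: l).countP (fun arr => decide (y ∈ arr)) = (a :: l).length := by
          exact_mod_cast hc'
        intro arr hm
        have := List.countP_eq_length.1 this arr hm
        simpa using this
      · intro hall
        have hk : y ∈ C.keys := by
          rw [hC, bCounts_mem_keys]
          exact Or.inr ⟨a, List.mem_cons_self .., hall a (List.mem_cons_self ..)⟩
        refine ⟨hk, ?_⟩
        have : (a :: l).countP (fun arr => decide (y ∈ arr)) = (a :: l).length :=
          List.countP_eq_length.2 (fun arr hm => by simpa using hall arr hm)
        simp [hcount y, this]
    have hperm : SA.Perm KF :=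
      (List.perm_ext_iff_of_nodup hAnd (List.Nodup.filter _ hknd)).2
        (fun y => (hAmem y).trans (hmemKF y).symm)
    have hlen : SA.length = KF.length := hperm.length_eq
    rw [hBnat]
    exact_mod_cast congrArg (fun n : Nat => (n : Int)) hlen
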